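-- pv_equiv track=rewrite | github.com/eyalk11/chess_stability | calc.py | format_move_with_numbering
-- ===== SOURCE A (Python) =====
-- def format_move_with_numbering(moves, half_move_number):
--     formatted_moves = []
--     f=half_move_number%2
--     move_number=half_move_number//2 +1
--
--     for i, move in enumerate(moves):
--         if i == 0 and f:
--             formatted_moves.append(f"{move_number}. .. {move}")
--             move_number += 1
--         elif i % 2 == f:
--             formatted_moves.append(f"{move_number}. {move}")
--             move_number += 1
--         else:
--             formatted_moves.append(move)
--
--     return ' '.join(formatted_moves)
-- ===== SOURCE B (Python) =====
-- def format_move_with_numbering(moves, half_move_number):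
--     # Pair-wise formatting: one "<n>. white black" token per full move
--     # instead of numbering half-moves one element at a time.
--     n = half_move_number // 2 + 1
--     tokens = []
--     if half_move_number % 2 and moves:
--         tokens.append(f"{n}. .. {moves[0]}")
--         n += 1
--         moves = moves[1:]
--     i = 0
--     while i < len(moves):
--         if i + 1 < len(moves):
--             tokens.append(f"{n}. {moves[i]} {moves[i+1]}")
--         else:
--             tokens.append(f"{n}. {moves[i]}")
--         n += 1
--         i += 2
--     return ' '.join(tokens)
-- ===== Notes on version B (the rewrite author's own statement) =====
-- stated objective: alternative
-- what changed: B walks the moves two at a time, emitting one combined '<n>. white black' token per full move (plus an unpaired '<n>. .. black' head when half_move_number is odd), instead of A's element-by-element enumerate loop that threads a parity flag and appends a separately numbered or plain token per half-move.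
import Mathlib
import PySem

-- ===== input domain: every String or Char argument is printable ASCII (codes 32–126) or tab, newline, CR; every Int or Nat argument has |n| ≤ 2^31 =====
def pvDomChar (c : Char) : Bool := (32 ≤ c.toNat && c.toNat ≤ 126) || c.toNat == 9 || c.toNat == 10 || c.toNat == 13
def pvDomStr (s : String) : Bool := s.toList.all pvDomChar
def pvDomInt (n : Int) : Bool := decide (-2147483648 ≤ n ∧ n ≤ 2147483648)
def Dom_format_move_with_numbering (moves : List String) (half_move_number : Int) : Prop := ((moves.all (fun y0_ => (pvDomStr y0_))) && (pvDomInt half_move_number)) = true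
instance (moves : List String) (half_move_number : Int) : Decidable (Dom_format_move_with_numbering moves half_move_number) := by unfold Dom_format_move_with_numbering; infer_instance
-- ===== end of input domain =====

-- B formats moves pair-wise (one combined token per full move) instead of A's
-- element-by-element enumerate loop with a parity flag; same output, different traversal.


-- ===== PORT A =====
-- loop body of A's 'for i, move in enumerate(moves)'; state = (formatted_moves, move_number)
def fmwnStep (f : Int) (st : List String × Int) (im : Int × String) : List String × Int :=
  if im.1 == 0 && !(f == 0) then
    (st.1 ++ [PySem.Int.toStr st.2 ++ ". .. " ++ im.2], st.2 + 1)
  else if PySem.Int.mod im.1 2 == f then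
    (st.1 ++ [PySem.Int.toStr st.2 ++ ". " ++ im.2], st.2 + 1)
  else
    (st.1 ++ [im.2], st.2)

def format_move_with_numbering (moves : List String) (half_move_number : Int) : String :=
  let f := PySem.Int.mod half_move_number 2
  let move_number := PySem.Int.floordiv half_move_number 2 + 1
  PySem.Str.join " " ((PySem.List.enumerate moves 0).foldl (fmwnStep f) ([], move_number)).1

-- ===== PORT B =====
-- B's while-loop: consume two half-moves per step, one combined token per full move
def fmwnPairs (n : Int) (ms : List String) : List String :=
  match ms with
  | [] => []
  | [w] => [PySem.Int.toStr n ++ ". " ++ w]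
  | w :: b :: r => (PySem.Int.toStr n ++ ". " ++ w ++ " " ++ b) :: fmwnPairs (n + 1) r

def format_move_with_numbering_alt (moves : List String) (half_move_number : Int) : String :=
  let n := PySem.Int.floordiv half_move_number 2 + 1
  match PySem.Int.mod half_move_number 2 == 0, moves with
  | false, m0 :: rest =>
      PySem.Str.join " " ((PySem.Int.toStr n ++ ". .. " ++ m0) :: fmwnPairs (n + 1) rest)
  | _, _ => PySem.Str.join " " (fmwnPairs n moves)

-- ===== PRECONDITION & SPEC =====
def Spec_format_move_with_numbering (moves : List String) (half_move_number : Int) (out : String) : Prop := out = format_move_with_numbering_alt moves half_move_number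
instance (moves : List String) (half_move_number : Int) (out : String) : Decidable (Spec_format_move_with_numbering moves half_move_number out) := by unfold Spec_format_move_with_numbering; infer_instance

-- ===== CLAIM (what is proved, stated in full; the proofs are below) =====
def Claim_equal_format_move_with_numbering : Prop := ∀ (moves : List String) (half_move_number : Int), Dom_format_move_with_numbering moves half_move_number → Spec_format_move_with_numbering moves half_move_number (format_move_with_numbering moves half_move_number)

-- ===== LEMMAS AND PROOFS =====

-- proof-side description of what A's loop appends after its first iteration:
-- a numbered token when the flag is true, the bare move when it is false
def fmwnTokA (b : Bool) (n : Int) (ms : List String) : List String :=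
  match b, ms with
  | _, [] => []
  | true, w :: r => (PySem.Int.toStr n ++ ". " ++ w) :: fmwnTokA false (n + 1) r
  | false, w :: r => w :: fmwnTokA true n r

theorem string_eq_of_toList {s t : String} (h : s.toList = t.toList) : s = t :=
  String.toList_inj.mp h

-- A's foldl, away from index 0 (or with f = 0, where the i == 0 branch is dead),
-- appends exactly the fmwnTokA tokens
theorem fmwn_fold_eq (ms : List String) : ∀ (f i n : Int) (acc : List String),
    (f = 0 ∨ f = 1) → (f = 0 ∨ 1 ≤ i) → 0 ≤ i →
    ((PySem.List.enumerate ms i).foldl (fmwnStep f) (acc, n)).1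
      = acc ++ fmwnTokA (PySem.Int.mod i 2 == f) n ms := by
  induction ms with
  | nil => intro f i n acc _ _ _; simp [PySem.List.enumerate_nil, fmwnTokA]
  | cons w r ih =>
    intro f i n acc hf hfi hi
    rw [PySem.List.enumerate_cons, List.foldl_cons]
    have e1 : PySem.Int.mod i 2 = i % 2 := PySem.Int.mod_eq_emod_of_pos (by norm_num)
    have e2 : PySem.Int.mod (i + 1) 2 = (i + 1) % 2 := PySem.Int.mod_eq_emod_of_pos (by norm_num)
    have hc1 : ((i == 0) && !(f == 0)) = false := by
      rcases hfi with h0 | h1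
      · simp [h0]
      · have : ¬ (i = 0) := by omega
        simp [this]
    have hflip : ((PySem.Int.mod (i + 1) 2 == f)) = !(PySem.Int.mod i 2 == f) := by
      rw [e1, e2]
      have h2 : i % 2 = 0 ∨ i % 2 = 1 := by omega
      have h3 : (i + 1) % 2 = 1 - i % 2 := by omega
      rcases hf with hf | hf <;> rcases h2 with h2 | h2 <;>
        simp [hf, h2, h3]
    by_cases hm : PySem.Int.mod i 2 = f
    · have hb : (PySem.Int.mod i 2 == f) = true := by simp only [beq_iff_eq]; exact hm
      rw [hb]
      have hstep : fmwnStep f (acc, n) (i, w)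
          = (acc ++ [PySem.Int.toStr n ++ ". " ++ w], n + 1) := by
        unfold fmwnStep
        dsimp only
        rw [if_neg (by rw [hc1]; exact Bool.false_ne_true), if_pos hb]
      rw [hstep, ih f (i + 1) (n + 1) _ hf (Or.inr (by omega)) (by omega), hflip, hb]
      simp [fmwnTokA]
    · have hb : (PySem.Int.mod i 2 == f) = false := by simp only [beq_eq_false_iff_ne]; exact hm
      rw [hb]
      have hstep : fmwnStep f (acc, n) (i, w) = (acc ++ [w], n) := by
        unfold fmwnStep
        dsimp only
        rw [if_neg (by rw [hc1]; exact Bool.false_ne_true),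
          if_neg (by rw [hb]; exact Bool.false_ne_true)]
      rw [hstep, ih f (i + 1) n _ hf (Or.inr (by omega)) (by omega), hflip, hb]
      simp [fmwnTokA]

theorem fmwnTokA_nil_iff (n : Int) (ms : List String) :
    fmwnTokA true n ms = [] ↔ ms = [] := by
  cases ms <;> simp [fmwnTokA]

theorem fmwnPairs_nil_iff (n : Int) (ms : List String) :
    fmwnPairs n ms = [] ↔ ms = [] := by
  match ms with
  | [] => simp [fmwnPairs]
  | [w] => simp [fmwnPairs]
  | w :: b :: r => simp [fmwnPairs]

-- joins agree on a common prefix provided the suffixes join equal and are empty together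
theorem join_congr_suffix (l1 l2 : List (List Char)) (pre : List (List Char))
    (hne : l1 = [] ↔ l2 = [])
    (h : PySem.Chars.join [' '] l1 = PySem.Chars.join [' '] l2) :
    PySem.Chars.join [' '] (pre ++ l1) = PySem.Chars.join [' '] (pre ++ l2) := by
  induction pre with
  | nil => simpa using h
  | cons p pre ih =>
    cases pre with
    | nil =>
      cases l1 with
      | nil => simp [hne.mp rfl]
      | cons a l1' =>
        cases l2 with
        | nil => exact absurd (hne.mpr rfl) (by simp)
        | cons b l2' =>
          simp only [List.nil_append, List.cons_append,
            PySem.Chars.join_cons_cons]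
          rw [h]
    | cons q pre' =>
      simp only [List.cons_append, PySem.Chars.join_cons_cons]
      have := ih
      simp only [List.cons_append] at this
      rw [this]

-- the heart: A's alternating numbered/plain tokens join to the same string
-- as B's combined per-full-move tokens
theorem fmwn_join_eq : ∀ (ms : List String) (n : Int),
    PySem.Chars.join [' '] ((fmwnTokA true n ms).map String.toList)
      = PySem.Chars.join [' '] ((fmwnPairs n ms).map String.toList)
  | [], _ => rfl
  | [w], n => rfl
  | w :: b :: r, n => by
    have ih := fmwn_join_eq r (n + 1)
    cases r with
    | nil => simp [fmwnTokA, fmwnPairs, PySem.Chars.join_cons_cons,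
        PySem.Chars.join_singleton]
    | cons x r' =>
      have hA : fmwnTokA true n (w :: b :: x :: r')
          = (PySem.Int.toStr n ++ ". " ++ w) :: b :: fmwnTokA true (n + 1) (x :: r') := by
        simp [fmwnTokA]
      have hB : fmwnPairs n (w :: b :: x :: r')
          = (PySem.Int.toStr n ++ ". " ++ w ++ " " ++ b) :: fmwnPairs (n + 1) (x :: r') := by
        simp [fmwnPairs]
      rw [hA, hB]
      obtain ⟨ta, la, hta⟩ : ∃ ta la, fmwnTokA true (n + 1) (x :: r') = ta :: la := by
        cases h : fmwnTokA true (n + 1) (x :: r') with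
        | nil => exact absurd ((fmwnTokA_nil_iff _ _).mp h) (by simp)
        | cons a l => exact ⟨a, l, rfl⟩
      obtain ⟨tb, lb, htb⟩ : ∃ tb lb, fmwnPairs (n + 1) (x :: r') = tb :: lb := by
        cases h : fmwnPairs (n + 1) (x :: r') with
        | nil => exact absurd ((fmwnPairs_nil_iff _ _).mp h) (by simp)
        | cons a l => exact ⟨a, l, rfl⟩
      rw [hta, htb]
      rw [hta, htb] at ih
      simp only [List.map_cons, PySem.Chars.join_cons_cons] at ih ⊢
      rw [ih]
      simp [List.append_assoc]

-- ===== VERDICT (by name: the statement is the Claim_ definition above) =====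
theorem format_move_with_numbering_spec : Claim_equal_format_move_with_numbering := by
  intro moves h _dom
  unfold Spec_format_move_with_numbering
  have hmr : PySem.Int.mod h 2 = 0 ∨ PySem.Int.mod h 2 = 1 := by
    have h1 := PySem.Int.mod_nonneg h (b := 2) (by norm_num)
    have h2 := PySem.Int.mod_lt h (b := 2) (by norm_num)
    omega
  have hA : format_move_with_numbering moves h
      = PySem.Str.join " " ((PySem.List.enumerate moves 0).foldl
          (fmwnStep (PySem.Int.mod h 2)) ([], PySem.Int.floordiv h 2 + 1)).1 := rfl
  by_cases hf : PySem.Int.mod h 2 = 0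
  · -- even half-move number: the i == 0 branch of A is dead
    have hB : format_move_with_numbering_alt moves h
        = PySem.Str.join " " (fmwnPairs (PySem.Int.floordiv h 2 + 1) moves) := by
      unfold format_move_with_numbering_alt
      rw [hf]
      cases moves <;> rfl
    rw [hA, hB, fmwn_fold_eq moves (PySem.Int.mod h 2) 0 _ [] hmr (Or.inl hf) le_rfl]
    have hb0 : (PySem.Int.mod (0 : Int) 2 == PySem.Int.mod h 2) = true := by rw [hf]; rfl
    rw [hb0]
    simp only [List.nil_append]
    apply string_eq_of_toList
    rw [PySem.Str.toList_join, PySem.Str.toList_join]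
    exact fmwn_join_eq moves _
  · -- odd: A's first iteration emits the '.. ' token, then the alternation starts at i = 1
    have hf1 : PySem.Int.mod h 2 = 1 := by tauto
    cases moves with
    | nil =>
      have hB : format_move_with_numbering_alt [] h = PySem.Str.join " " [] := by
        unfold format_move_with_numbering_alt
        rw [hf1]
        rfl
      rw [hA, hB]
      rfl
    | cons m0 rest =>
      have hB : format_move_with_numbering_alt (m0 :: rest) h
          = PySem.Str.join " "
              ((PySem.Int.toStr (PySem.Int.floordiv h 2 + 1) ++ ". .. " ++ m0)
                :: fmwnPairs (PySem.Int.floordiv h 2 + 1 + 1) rest) := by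
        unfold format_move_with_numbering_alt
        rw [hf1]
        rfl
      rw [hA, hB, PySem.List.enumerate_cons, List.foldl_cons]
      have hstep : fmwnStep (PySem.Int.mod h 2) ([], PySem.Int.floordiv h 2 + 1) (0, m0)
          = ([PySem.Int.toStr (PySem.Int.floordiv h 2 + 1) ++ ". .. " ++ m0],
             PySem.Int.floordiv h 2 + 1 + 1) := by
        unfold fmwnStep
        rw [hf1]
        rfl
      rw [hstep, show (0 : Int) + 1 = 1 from by norm_num,
        fmwn_fold_eq rest (PySem.Int.mod h 2) 1 _ _ hmr (Or.inr le_rfl) (by norm_num)]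
      have hb1 : (PySem.Int.mod (1 : Int) 2 == PySem.Int.mod h 2) = true := by rw [hf1]; rfl
      rw [hb1]
      apply string_eq_of_toList
      rw [PySem.Str.toList_join, PySem.Str.toList_join]
      simp only [List.singleton_append, List.map_cons]
      exact join_congr_suffix
        ((fmwnTokA true (PySem.Int.floordiv h 2 + 1 + 1) rest).map String.toList)
        ((fmwnPairs (PySem.Int.floordiv h 2 + 1 + 1) rest).map String.toList)
        [(PySem.Int.toStr (PySem.Int.floordiv h 2 + 1) ++ ". .. " ++ m0).toList]
        (by simp [fmwnTokA_nil_iff, fmwnPairs_nil_iff])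
        (fmwn_join_eq rest _)
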